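-- pv_equiv track=rewrite | github.com/dee021/CodingTest | 프로그래머스/unrated/135808. 과일 장수/과일 장수.py | solution
-- ===== SOURCE A (Python) =====
-- def solution(k, m, score):
--     box = len(score)//m
--     score = [score.count(x) for x in range(0,k+1)]
--     answer = 0; t = 0
--     for idx in range(k, 0, -1):
--         if not box:
--             break
--         t += score[idx]
--         if t >= m:
--             b = min(box, t//m)
--             answer += idx*m*b
--             box -= b
--             t %= m
--     return answer
-- ===== SOURCE B (Python) =====
-- def solution(k, m, score):
--     s = sorted((x for x in score if 0 < x <= k), reverse=True)
--     answer = 0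
--     for i in range(m - 1, len(s), m):
--         answer += s[i] * m
--     return answer
-- ===== Notes on version B (the rewrite author's own statement) =====
-- stated objective: faster
-- what changed: A builds a per-grade frequency table with repeated score.count over range(0,k+1) and runs a high-to-low greedy accumulation with carry/box bookkeeping; B sorts the valid grades descending once and sums each full box's minimum by striding every m-th element.
-- outside the precondition, e.g. on solution(5, -2, [1, 2, 3, 4]): A returns 20, B returns 0
import Mathlib
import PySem

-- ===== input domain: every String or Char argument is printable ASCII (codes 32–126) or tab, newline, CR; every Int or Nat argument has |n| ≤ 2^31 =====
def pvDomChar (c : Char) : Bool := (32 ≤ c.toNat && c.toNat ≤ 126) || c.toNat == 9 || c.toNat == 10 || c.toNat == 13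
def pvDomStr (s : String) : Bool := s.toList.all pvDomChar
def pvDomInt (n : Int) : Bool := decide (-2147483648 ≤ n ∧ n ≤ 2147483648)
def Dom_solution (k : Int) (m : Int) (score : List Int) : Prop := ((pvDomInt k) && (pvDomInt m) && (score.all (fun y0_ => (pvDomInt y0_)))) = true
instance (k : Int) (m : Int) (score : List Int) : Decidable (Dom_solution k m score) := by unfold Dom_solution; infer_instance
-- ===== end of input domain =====

-- B replaces A's per-grade counting greedy by the idiomatic sort-descending-and-stride solution; equal on every m ≥ 1.

-- ===== PORT A =====
-- A's for-loop over range(k, 0, -1) with its early break; state (answer, t, box).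
-- score[idx] is ported with pyGetD: whenever the loop body runs, 1 ≤ idx ≤ k < (table length), so the index is always in range.
def solutionLoop (tbl : List Int) (m : Int) : List Int → Int → Int → Int → Int
  | [], answer, _t, _box => answer
  | idx :: rest, answer, t, box =>
    if box = 0 then answer
    else
      let t' := t + PySem.List.pyGetD tbl idx 0
      if t' ≥ m then
        let b := min box (PySem.Int.floordiv t' m)
        solutionLoop tbl m rest (answer + idx * m * b) (PySem.Int.mod t' m) (box - b)
      else
        solutionLoop tbl m rest answer t' box

def solution (k : Int) (m : Int) (score : List Int) : Int :=
  let box := PySem.Int.floordiv (score.length : Int) m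
  let tbl := (PySem.List.pyRange 0 (k + 1) 1).map (fun x => ((PySem.List.count score x : Nat) : Int))
  solutionLoop tbl m (PySem.List.pyRange k 0 (-1)) 0 0 box

-- ===== PORT B =====
def solution_alt (k : Int) (m : Int) (score : List Int) : Int :=
  let s := PySem.List.sorted (score.filter (fun x => decide (0 < x) && decide (x ≤ k))) (fun x => x) true
  (PySem.List.pyRange (m - 1) (s.length : Int) m).foldl
    (fun answer i => answer + PySem.List.pyGetD s i 0 * m) 0

-- ===== PRECONDITION & SPEC =====
-- Pre_ excludes m ≤ 0: for m = 0 A raises ZeroDivisionError, and for m < 0 a "box" of negative size is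
-- outside the function's meaning, so A's value there (an artefact of floor division by a negative divisor)
-- and B's are both arbitrary.
def Pre_solution (k : Int) (m : Int) (score : List Int) : Prop := 1 ≤ m
instance (k : Int) (m : Int) (score : List Int) : Decidable (Pre_solution k m score) := by unfold Pre_solution; infer_instance

def pvWitness_solution : Int × Int × List Int := (3, 2, [1, 2, 3, 1, 2, 3, 1])

def Spec_solution (k : Int) (m : Int) (score : List Int) (out : Int) : Prop := out = solution_alt k m score
instance (k : Int) (m : Int) (score : List Int) (out : Int) : Decidable (Spec_solution k m score out) := by unfold Spec_solution; infer_instance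

-- ===== CLAIM (what is proved, stated in full; the proofs are below) =====
def Claim_equal_solution : Prop := ∀ (k : Int) (m : Int) (score : List Int), Dom_solution k m score → Pre_solution k m score → Spec_solution k m score (solution k m score)

-- ===== LEMMAS AND PROOFS =====

-- the descending list of all valid grades with multiplicities: [j,…,j, j-1,…,j-1, …, 1,…,1]
def pvBlocks (score : List Int) (j : Int) : List Int :=
  (PySem.List.pyRange j 0 (-1)).flatMap (fun v => List.replicate (List.count v score) v)

theorem pvBlocks_nonpos (score : List Int) {j : Int} (h : j ≤ 0) : pvBlocks score j = [] := by
  unfold pvBlocks; rw [PySem.List.pyRange_neg_one_eq_nil h]; rfl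

theorem pvBlocks_cons (score : List Int) {j : Int} (h : 0 < j) :
    pvBlocks score j = List.replicate (List.count j score) j ++ pvBlocks score (j - 1) := by
  unfold pvBlocks; rw [PySem.List.pyRange_neg_one_cons h, List.flatMap_cons]

theorem pvBlocks_mem (score : List Int) (j : Int) :
    ∀ x ∈ pvBlocks score j, 0 < x ∧ x ≤ j := by
  intro x hx
  unfold pvBlocks at hx
  rcases List.mem_flatMap.mp hx with ⟨v, hv, hxv⟩
  rcases PySem.List.mem_pyRange_neg_one.mp hv with ⟨h0, hj⟩
  rcases List.eq_of_mem_replicate hxv with rfl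
  exact ⟨h0, hj⟩

theorem pvBlocks_pairwise (score : List Int) (j : Int) :
    (pvBlocks score j).Pairwise (fun a b => b ≤ a) := by
  have H : ∀ (n : Nat) (j : Int), j ≤ (n : Int) → (pvBlocks score j).Pairwise (fun a b => b ≤ a) := by
    intro n
    induction n with
    | zero => intro j hj; rw [pvBlocks_nonpos score (by exact_mod_cast hj)]; exact List.Pairwise.nil
    | succ n ih =>
      intro j hj
      by_cases h0 : j ≤ 0
      · rw [pvBlocks_nonpos score h0]; exact List.Pairwise.nil
      · rw [pvBlocks_cons score (by omega)]
        apply List.pairwise_append.mpr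
        refine ⟨List.pairwise_replicate.mpr (by simp), ih (j - 1) (by omega), ?_⟩
        intro a ha b hb
        rcases List.eq_of_mem_replicate ha with rfl
        have := (pvBlocks_mem score (a - 1) b hb).2
        omega
  by_cases h0 : j ≤ 0
  · rw [pvBlocks_nonpos score h0]; exact List.Pairwise.nil
  · exact H j.toNat j (by omega)

theorem pvBlocks_count (score : List Int) (j : Int) (x : Int) :
    List.count x (pvBlocks score j) =
      if 0 < x ∧ x ≤ j then List.count x score else 0 := by
  have H : ∀ (n : Nat) (j : Int), j ≤ (n : Int) →
      List.count x (pvBlocks score j) = if 0 < x ∧ x ≤ j then List.count x score else 0 := by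
    intro n
    induction n with
    | zero =>
      intro j hj
      rw [pvBlocks_nonpos score (by exact_mod_cast hj)]
      have : ¬ (0 < x ∧ x ≤ j) := by omega
      simp [this]
    | succ n ih =>
      intro j hj
      by_cases h0 : j ≤ 0
      · rw [pvBlocks_nonpos score h0]
        have : ¬ (0 < x ∧ x ≤ j) := by omega
        simp [this]
      · rw [pvBlocks_cons score (by omega), List.count_append, List.count_replicate,
            ih (j - 1) (by omega)]
        by_cases hx : x = j
        · subst hx
          have hx1 : 0 < x := by omega
          simp only [beq_self_eq_true, if_pos]
          rw [if_pos (by omega : 0 < x ∧ x ≤ x), if_neg (by omega : ¬ (0 < x ∧ x ≤ x - 1))]; omega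
        · have h1 : ¬ ((j == x) = true) := by
            simp only [beq_iff_eq]
            exact fun h => hx h.symm
          simp only [if_neg h1]
          by_cases h2 : 0 < x ∧ x ≤ j - 1
          · rw [if_pos h2, if_pos (by omega)]; omega
          · rw [if_neg h2, if_neg (by omega)]
  by_cases h0 : j ≤ 0
  · rw [pvBlocks_nonpos score h0]
    have : ¬ (0 < x ∧ x ≤ j) := by omega
    simp [this]
  · exact H j.toNat j (by omega)

theorem pvBlocks_perm (score : List Int) (k : Int) :
    (pvBlocks score k).Perm (score.filter (fun x => decide (0 < x) && decide (x ≤ k))) := by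
  apply List.perm_iff_count.mpr
  intro x
  rw [pvBlocks_count]
  by_cases hx : 0 < x ∧ x ≤ k
  · rw [if_pos hx, List.count_filter]
    simp [hx.1, hx.2]
  · rw [if_neg hx]
    symm
    rw [List.count_eq_zero]
    intro hmem
    have := List.of_mem_filter hmem
    simp at this
    exact hx (by omega)

theorem pvSorted_eq_blocks (score : List Int) (k : Int) :
    PySem.List.sorted (score.filter (fun x => decide (0 < x) && decide (x ≤ k))) (fun x => x) true
      = pvBlocks score k := by
  apply PySem.List.eq_of_perm_of_pairwise_le_of_injective (fun x : Int => -x) neg_injective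
  · exact (PySem.List.sorted_perm _ _ _).trans (pvBlocks_perm score k).symm
  · exact (PySem.List.sorted_pairwise_rev _ _).imp (by intro a b h; simpa using h)
  · exact (pvBlocks_pairwise score k).imp (by intro a b h; simpa using h)

-- the table lookup of A is the count of the grade
theorem pvTbl_lookup (score : List Int) (k j : Int) (h0 : 0 < j) (hk : j ≤ k) :
    PySem.List.pyGetD ((PySem.List.pyRange 0 (k + 1) 1).map
        (fun x => ((PySem.List.count score x : Nat) : Int))) j 0
      = ((List.count j score : Nat) : Int) := by
  rw [PySem.List.pyGetD_map_pyRange_of_nonneg _ _ _ _ (by omega) (by omega),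
      PySem.List.count_eq]

-- Nat division bookkeeping
theorem pvDivSplit {m : Nat} (hm : 0 < m) (off c : Nat) :
    (off + c) / m = off / m + (off % m + c) / m ∧ (off + c) % m = (off % m + c) % m := by
  have h : off + c = m * (off / m) + (off % m + c) := by
    have := Nat.div_add_mod off m; omega
  constructor
  · rw [h, Nat.mul_add_div hm]
  · rw [h, Nat.mul_add_mod]

theorem pvLtDivSucc {m : Nat} (hm : 0 < m) (a : Nat) : a < (a / m + 1) * m := by
  have h := Nat.div_add_mod a m
  have h2 := Nat.mod_lt a hm
  nlinarith

theorem pvSumRange (f : Nat → Int) (q : Nat) :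
    ((List.range q).map f).sum = ∑ t ∈ Finset.range q, f t := by
  induction q with
  | zero => simp
  | succ q ih => rw [List.range_succ, List.map_append, List.sum_append, Finset.sum_range_succ, ih]; simp

-- main invariant of A's loop: with t = off % m and box = len(score)/m - off/m, where off elements of the
-- descending grade list s have already been consumed, the loop adds m times the sum of the remaining box minima
theorem pvLoopInv (score : List Int) (k : Int) (m : Nat) (hm : 0 < m)
    (s : List Int) (hslen : s.length ≤ score.length) :
    ∀ (n : Nat) (j : Int), j ≤ (n : Int) → j ≤ k → ∀ (off : Nat) (answer : Int),
      s.drop off = pvBlocks score j →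
      off + (pvBlocks score j).length = s.length →
      solutionLoop ((PySem.List.pyRange 0 (k + 1) 1).map
          (fun x => ((PySem.List.count score x : Nat) : Int)))
        (m : Int) (PySem.List.pyRange j 0 (-1)) answer ((off % m : Nat) : Int)
        (((score.length / m - off / m : Nat)) : Int)
      = answer + (m : Int) *
          ∑ t ∈ Finset.Ico (off / m) (s.length / m), s.getD ((t + 1) * m - 1) 0 := by
  intro n
  induction n with
  | zero =>
    intro j hj _ off answer hdrop hlen
    have h0 : j ≤ 0 := by exact_mod_cast hj
    rw [pvBlocks_nonpos score h0] at hlen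
    simp only [List.length_nil, Nat.add_zero] at hlen
    rw [PySem.List.pyRange_neg_one_eq_nil h0, hlen]
    simp only [solutionLoop]
    rw [Finset.Ico_self, Finset.sum_empty, mul_zero, add_zero]
  | succ n ih =>
    intro j hj hjk off answer hdrop hlen
    by_cases h0 : j ≤ 0
    · rw [pvBlocks_nonpos score h0] at hlen
      simp only [List.length_nil, Nat.add_zero] at hlen
      rw [PySem.List.pyRange_neg_one_eq_nil h0, hlen]
      simp only [solutionLoop]
      rw [Finset.Ico_self, Finset.sum_empty, mul_zero, add_zero]
    · -- 0 < j : one loop iteration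
      rw [PySem.List.pyRange_neg_one_cons (by omega : (0:Int) < j)]
      rw [pvBlocks_cons score (by omega : (0:Int) < j)] at hdrop hlen
      set c := List.count j score with hc
      have hlen' : off + c + (pvBlocks score (j - 1)).length = s.length := by
        simp only [List.length_append, List.length_replicate] at hlen; omega
      have hoc : off + c ≤ s.length := by omega
      obtain ⟨hd, hmo⟩ := pvDivSplit hm off c
      have hq1 : (off + c) / m ≤ s.length / m := Nat.div_le_div_right hoc
      have hq2 : s.length / m ≤ score.length / m := Nat.div_le_div_right hslen
      have hq3 : off / m ≤ (off + c) / m := Nat.div_le_div_right (by omega)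
      have hdrop' : s.drop (off + c) = pvBlocks score (j - 1) := by
        rw [← List.drop_drop, hdrop]
        simp
      simp only [solutionLoop]
      rw [pvTbl_lookup score k j (by omega) hjk]
      by_cases hbox : score.length / m ≤ off / m
      · -- box == 0: break; no full boxes remain
        rw [if_pos (by omega : ((score.length / m - off / m : Nat) : Int) = 0)]
        have hico : s.length / m ≤ off / m := le_trans hq2 hbox
        rw [Finset.Ico_eq_empty (by omega), Finset.sum_empty, mul_zero, add_zero]
      · rw [if_neg (by omega : ¬ ((score.length / m - off / m : Nat) : Int) = 0)]
        rw [show ((off % m : Nat) : Int) + ((c : Nat) : Int) = ((off % m + c : Nat) : Int) by push_cast; ring]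
        by_cases hge : m ≤ off % m + c
        · -- a full box (or more) is completed at this grade
          rw [if_pos (by exact_mod_cast hge : ((off % m + c : Nat) : Int) ≥ (m : Int))]
          rw [PySem.Int.floordiv_natCast, PySem.Int.mod_natCast]
          have hqle : (off % m + c) / m ≤ score.length / m - off / m := by omega
          rw [min_eq_right (show ((((off % m + c) / m : Nat)) : Int)
              ≤ ((score.length / m - off / m : Nat) : Int) by exact_mod_cast hqle)]
          rw [show ((score.length / m - off / m : Nat) : Int) - (((off % m + c) / m : Nat) : Int)
              = ((score.length / m - (off + c) / m : Nat) : Int) by omega]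
          rw [show ((off % m + c) % m : Nat) = (off + c) % m from hmo.symm]
          rw [ih (j - 1) (by omega) (by omega) (off + c)
                (answer + j * (m : Int) * (((off % m + c) / m : Nat) : Int)) hdrop' hlen']
          -- the skipped stride positions all carry the value j
          have hG : ∀ t ∈ Finset.Ico (off / m) ((off + c) / m),
              s.getD ((t + 1) * m - 1) 0 = j := by
            intro t ht
            obtain ⟨ht1, ht2⟩ := Finset.mem_Ico.mp ht
            have hmul1 : (off / m + 1) * m ≤ (t + 1) * m := Nat.mul_le_mul_right m (by omega)
            have hlow := pvLtDivSucc hm off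
            have hmul2 : (t + 1) * m ≤ ((off + c) / m) * m := Nat.mul_le_mul_right m (by omega)
            have hup : ((off + c) / m) * m ≤ off + c := Nat.div_mul_le_self _ _
            have hlen2 : (t + 1) * m - 1 < s.length := by omega
            rw [List.getD_eq_getElem s 0 hlen2]
            have hu : (t + 1) * m - 1 - off < c := by omega
            have h5 : (List.drop off s)[(t + 1) * m - 1 - off]'(by rw [List.length_drop]; omega)
                = s[(t + 1) * m - 1]'hlen2 := by
              rw [List.getElem_drop]
              congr 1
              omega
            rw [← h5, List.getElem_of_eq hdrop,
                List.getElem_append_left (by rw [List.length_replicate]; exact hu),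
                List.getElem_replicate]
          rw [← Finset.sum_Ico_consecutive (fun t => s.getD ((t + 1) * m - 1) 0) hq3 hq1,
              Finset.sum_congr rfl hG, Finset.sum_const, Nat.card_Ico, nsmul_eq_mul]
          have hcard : ((off + c) / m - off / m : Nat) = (off % m + c) / m := by omega
          rw [hcard]
          push_cast
          ring
        · -- no box completed: only the carry grows
          rw [if_neg (by exact_mod_cast hge : ¬ ((off % m + c : Nat) : Int) ≥ (m : Int))]
          have hmod : off % m < m := Nat.mod_lt off hm
          have hq0 : (off % m + c) / m = 0 := Nat.div_eq_of_lt (by omega)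
          have hmm : (off % m + c) % m = off % m + c := Nat.mod_eq_of_lt (by omega)
          rw [show (off % m + c : Nat) = (off + c) % m by rw [hmo, hmm]]
          rw [show off / m = (off + c) / m by omega]
          exact ih (j - 1) (by omega) (by omega) (off + c) answer hdrop' hlen'

-- B's stride fold is m times the sum of the box minima
theorem pvAltEq (m : Nat) (hm : 0 < m) (s : List Int) :
    (PySem.List.pyRange ((m : Int) - 1) (s.length : Int) (m : Int)).foldl
        (fun answer i => answer + PySem.List.pyGetD s i 0 * (m : Int)) 0
      = (m : Int) * ∑ t ∈ Finset.Ico 0 (s.length / m), s.getD ((t + 1) * m - 1) 0 := by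
  rw [PySem.List.pyRange_of_pos _ _ (by exact_mod_cast hm : (0:Int) < (m:Int))]
  have hq : (if ((m:Int) - 1) < (s.length:Int)
        then (((s.length:Int) - ((m:Int) - 1) + (m:Int) - 1) / (m:Int)).toNat else 0)
      = s.length / m := by
    split_ifs with h
    · have h1 : ((s.length:Int) - ((m:Int) - 1) + (m:Int) - 1) = (s.length : Int) := by ring
      rw [h1, ← Int.natCast_div, Int.toNat_natCast]
    · have h2 : s.length < m := by omega
      rw [Nat.div_eq_of_lt h2]
  rw [hq, List.foldl_map,
      PySem.List.foldl_add (g := fun (t : Nat) => PySem.List.pyGetD s ((m:Int) - 1 + (m:Int) * t) 0 * (m:Int)),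
      pvSumRange, zero_add, Finset.range_eq_Ico]
  have hcong : ∀ t ∈ Finset.Ico 0 (s.length / m),
      PySem.List.pyGetD s ((m:Int) - 1 + (m:Int) * t) 0 * (m:Int)
        = s.getD ((t + 1) * m - 1) 0 * (m:Int) := by
    intro t _
    have h1 : 1 ≤ (t + 1) * m := by nlinarith
    have hidx : ((m:Int) - 1 + (m:Int) * t) = (((t + 1) * m - 1 : Nat) : Int) := by
      push_cast [Nat.cast_sub h1]
      ring
    rw [hidx, PySem.List.pyGetD_natCast]
  rw [Finset.sum_congr rfl hcong, ← Finset.sum_mul, mul_comm]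

-- ===== VERDICT (by name: the statement is the Claim_ definition above) =====
theorem solution_spec : Claim_equal_solution := by
  intro k m score _hdom hpre
  have hp : (1 : Int) ≤ m := hpre
  obtain ⟨mN, rfl, hmN⟩ : ∃ mN : Nat, m = (mN : Int) ∧ 0 < mN :=
    ⟨m.toNat, by omega, by omega⟩
  show solution k (mN : Int) score = solution_alt k (mN : Int) score
  simp only [solution, solution_alt]
  rw [pvSorted_eq_blocks score k, pvAltEq mN hmN (pvBlocks score k)]
  have hslen : (pvBlocks score k).length ≤ score.length := by
    rw [(pvBlocks_perm score k).length_eq]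
    exact List.length_filter_le _ _
  have h0 := pvLoopInv score k mN hmN (pvBlocks score k) hslen k.toNat k
    (by omega) (le_refl k) 0 0 List.drop_zero (by omega)
  rw [Nat.zero_mod, Nat.cast_zero, Nat.zero_div, Nat.sub_zero] at h0
  rw [PySem.Int.floordiv_natCast, h0, zero_add]
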